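-- pv_equiv track=rewrite | github.com/sshadde/algorithms | lab11/src/z_function.py | z_search
-- ===== SOURCE A (Python) =====
-- def z_function(s: str) -> list[int]:
--     """
--     Вычисляет Z-функцию для строки.
--
--     Параметры:
--     s (str): Входная строка.
--
--     Возвращает:
--     list[int]: Массив Z длины n.
--     """
--     n = len(s)
--     z = [0] * n
--     left = right = 0
--
--     for i in range(1, n):
--         if i <= right:
--             z[i] = min(right - i + 1, z[i - left])
--
--         while i + z[i] < n and s[z[i]] == s[i + z[i]]:
--             z[i] += 1
--
--         if i + z[i] - 1 > right:
--             left, right = i, i + z[i] - 1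
--
--     return z
--
-- def z_search(text: str, pattern: str) -> list[int]:
--     """
--     Поиск подстроки в тексте с использованием Z-функции.
--
--     Параметры:
--     text (str): Исходный текст.
--     pattern (str): Искомый шаблон.
--
--     Возвращает:
--     list[int]: Список индексов начала вхождений.
--     """
--     if not pattern:
--         return []
--
--     combined = pattern + "#" + text
--     z = z_function(combined)
--     result = []
--     pattern_len = len(pattern)
--
--     for i in range(pattern_len + 1, len(z)):
--         if z[i] == pattern_len:
--             result.append(i - pattern_len - 1)
--
--     return result
-- ===== SOURCE B (Python) =====
-- def z_search(text: str, pattern: str) -> list[int]: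
--     if not pattern:
--         return []
--     m = len(pattern)
--     return [i for i in range(len(text) - m + 1) if text[i:i + m] == pattern]
-- ===== Notes on version B (the rewrite author's own statement) =====
-- stated objective: simpler
-- what changed: Replaced the Z-function over pattern+'#'+text by a direct one-line scan that compares the length-m slice at every start position with the pattern.
-- intended difference: On texts containing an occurrence of the pattern immediately followed by '#', A omits that occurrence (its separator '#' matches the text's '#', so the Z-value overshoots pattern_len), while B reports it; reporting every occurrence is the intended behaviour of substring search. — e.g. on z_search("a#", "a"): A returns [], B returns [0]
import Mathlib
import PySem

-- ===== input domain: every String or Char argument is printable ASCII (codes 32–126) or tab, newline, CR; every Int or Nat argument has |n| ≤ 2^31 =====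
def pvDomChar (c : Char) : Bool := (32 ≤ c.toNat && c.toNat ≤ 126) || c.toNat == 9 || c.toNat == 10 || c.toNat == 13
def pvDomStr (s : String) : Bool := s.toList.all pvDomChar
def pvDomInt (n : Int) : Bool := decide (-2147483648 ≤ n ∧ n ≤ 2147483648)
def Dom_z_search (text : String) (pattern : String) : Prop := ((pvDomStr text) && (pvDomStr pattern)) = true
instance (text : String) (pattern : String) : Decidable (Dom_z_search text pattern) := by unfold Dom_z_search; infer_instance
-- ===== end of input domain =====

-- B replaces the Z-function search by a direct slice-comparison scan (simpler); on occurrences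
-- immediately followed by '#' in the text A's separator trick miscounts and drops them (see D_ below).

-- ===== PORT A =====
-- the inner `while i + z[i] < n and s[z[i]] == s[i + z[i]]: z[i] += 1` loop of z_function
def zextAux (s : List Char) (i : Nat) : Nat → Nat → Nat
  | w, 0 => w
  | w, fuel + 1 =>
    if i + w < s.length ∧ s.getD w ' ' = s.getD (i + w) ' ' then zextAux s i (w + 1) fuel else w

def zext (s : List Char) (i w : Nat) : Nat := zextAux s i w (s.length - (i + w))

-- one iteration of z_function's `for i in range(1, n)` loop; state = (z, left, right)
def zstep (s : List Char) (st : List Nat × Nat × Nat) (i : Nat) : List Nat × Nat × Nat :=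
  let z := st.1; let left := st.2.1; let right := st.2.2
  let v := if i ≤ right then min (right - i + 1) (z.getD (i - left) 0) else z.getD i 0
  let w := zext s i v
  let z' := z.set i w
  if right < i + w - 1 then (z', i, i + w - 1) else (z', left, right)

def z_function_port (s : List Char) : List Nat :=
  ((List.range' 1 (s.length - 1)).foldl (zstep s) (List.replicate s.length 0, 0, 0)).1

def z_search (text : String) (pattern : String) : List Int :=
  if pattern = "" then []
  else
    let combined := pattern.toList ++ '#' :: text.toList
    let z := z_function_port combined
    let m := pattern.toList.length
    (List.range' (m + 1) (z.length - (m + 1))).foldl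
      (fun acc i => if z.getD i 0 = m then acc ++ [(i : Int) - m - 1] else acc) []

-- ===== PORT B =====
def z_search_alt (text : String) (pattern : String) : List Int :=
  if pattern = "" then []
  else
    let t := text.toList
    let p := pattern.toList
    (List.range (t.length + 1 - p.length)).filterMap
      (fun j => if (t.drop j).take p.length = p then some ((j : Int)) else none)

-- ===== PRECONDITION & SPEC =====
-- On texts containing an occurrence of the pattern immediately followed by '#', A omits that
-- occurrence (the separator '#' matches the text's '#', so the Z-value overshoots pattern_len),
-- while B reports it; reporting every occurrence is the intended behaviour of substring search.
-- is some prefix of the remaining list a '#' preceded by the word rp (reversed)?  rpre = reversed consumed prefix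
def scanRev (rp : List Char) (rpre : List Char) : List Char → Bool
  | [] => false
  | c :: rest => (decide (c = '#') && rp.isPrefixOf rpre) || scanRev rp (c :: rpre) rest

def D_z_search (text : String) (pattern : String) : Prop :=
  pattern ≠ "" ∧ scanRev pattern.toList.reverse [] text.toList = true
instance (text : String) (pattern : String) : Decidable (D_z_search text pattern) := by
  unfold D_z_search; infer_instance

def Spec_z_search (text : String) (pattern : String) (out : List Int) : Prop :=
  ¬ D_z_search text pattern → out = z_search_alt text pattern
instance (text : String) (pattern : String) (out : List Int) : Decidable (Spec_z_search text pattern out) := by unfold Spec_z_search; infer_instance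

def pvDiffWitness_z_search : String × String := ("a#", "a")
def pvDiffWitnessOut_z_search : (List Int) × (List Int) := ([], [0])

-- ===== CLAIM (what is proved, stated in full; the proofs are below) =====
def Claim_unchanged_z_search : Prop := ∀ (text : String) (pattern : String), Dom_z_search text pattern → Spec_z_search text pattern (z_search text pattern)
def Claim_changed_z_search : Prop := Dom_z_search (pvDiffWitness_z_search.1) (pvDiffWitness_z_search.2) ∧ D_z_search (pvDiffWitness_z_search.1) (pvDiffWitness_z_search.2) ∧ z_search (pvDiffWitness_z_search.1) (pvDiffWitness_z_search.2) = pvDiffWitnessOut_z_search.1 ∧ z_search_alt (pvDiffWitness_z_search.1) (pvDiffWitness_z_search.2) = pvDiffWitnessOut_z_search.2 ∧ pvDiffWitnessOut_z_search.1 ≠ pvDiffWitnessOut_z_search.2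
def Claim_exact_z_search : Prop := ∀ (text : String) (pattern : String), Dom_z_search text pattern → D_z_search text pattern → z_search text pattern ≠ z_search_alt text pattern

-- ===== LEMMAS AND PROOFS =====

-- longest common prefix length of two lists
def zlcp : List Char → List Char → Nat
  | x :: xs, y :: ys => if x = y then zlcp xs ys + 1 else 0
  | _, _ => 0

-- the true Z-value at position i
def zspecF (s : List Char) (i : Nat) : Nat := zlcp s (s.drop i)

theorem le_zlcp_iff (k : Nat) (xs ys : List Char) :
    k ≤ zlcp xs ys ↔ k ≤ xs.length ∧ k ≤ ys.length ∧ xs.take k = ys.take k := by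
  induction xs generalizing ys k with
  | nil => cases k <;> simp [zlcp]
  | cons x xs ih =>
    cases ys with
    | nil => cases k <;> simp [zlcp]
    | cons y ys =>
      cases k with
      | zero => simp
      | succ k =>
        by_cases hxy : x = y
        · subst hxy
          simp [zlcp, ih k ys]
        · simp [zlcp, hxy]

theorem zlcp_le_right (xs ys : List Char) : zlcp xs ys ≤ ys.length :=
  ((le_zlcp_iff _ _ _).mp le_rfl).2.1

theorem zspecF_le (s : List Char) (i : Nat) : zspecF s i ≤ s.length - i := by
  have := zlcp_le_right s (s.drop i)
  simpa [zspecF] using this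

theorem take_eq_char {xs ys : List Char} {k v : Nat} (hv : v < k)
    (h : xs.take k = ys.take k) : xs[v]? = ys[v]? := by
  have := congrArg (fun l => l[v]?) h
  simpa [List.getElem?_take, hv] using this

theorem take_succ_eq {xs ys : List Char} {v : Nat}
    (h : xs.take v = ys.take v) (hc : xs[v]? = ys[v]?) :
    xs.take (v + 1) = ys.take (v + 1) := by
  rw [List.take_succ, List.take_succ, h, hc]

theorem take_eq_of_chars (xs ys : List Char) (v : Nat)
    (h : ∀ k, k < v → xs[k]? = ys[k]?) : xs.take v = ys.take v := by
  induction v with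
  | zero => simp
  | succ v ih =>
    exact take_succ_eq (ih (fun k hk => h k (Nat.lt_succ_of_lt hk))) (h v (Nat.lt_succ_self v))

theorem zext_unfold (s : List Char) (i w : Nat) :
    zext s i w = if i + w < s.length ∧ s.getD w ' ' = s.getD (i + w) ' '
                 then zext s i (w + 1) else w := by
  unfold zext
  cases h : s.length - (i + w) with
  | zero =>
    have hc : ¬ (i + w < s.length ∧ s.getD w ' ' = s.getD (i + w) ' ') := by
      intro hc; omega
    rw [if_neg hc]
    rfl
  | succ k =>
    have hk : s.length - (i + (w + 1)) = k := by omega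
    rw [hk]
    rfl

theorem zext_eq (s : List Char) (i : Nat) (hi : 1 ≤ i) :
    ∀ v, v ≤ zspecF s i → zext s i v = zspecF s i := by
  have H : ∀ d v, zspecF s i - v = d → v ≤ zspecF s i → zext s i v = zspecF s i := by
    intro d
    induction d with
    | zero =>
      intro v hd hv
      have hveq : v = zspecF s i := by omega
      rw [zext_unfold, if_neg]
      · exact hveq
      rintro ⟨h1, h2⟩
      -- from the matching character, v + 1 would also be a common-prefix length
      obtain ⟨hx, hy, ht⟩ := (le_zlcp_iff v s (s.drop i)).mp hv
      have hvn : v < s.length := by omega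
      have hvd : v < (s.drop i).length := by simp; omega
      have hch : s[v]? = (s.drop i)[v]? := by
        rw [List.getElem?_drop]
        rw [List.getD_eq_getElem?_getD, List.getD_eq_getElem?_getD] at h2
        rw [List.getElem?_eq_getElem hvn, List.getElem?_eq_getElem h1] at h2 ⊢
        simpa using h2
      have : v + 1 ≤ zlcp s (s.drop i) := by
        refine (le_zlcp_iff (v + 1) s (s.drop i)).mpr ⟨by omega, by simp; omega, ?_⟩
        exact take_succ_eq ht hch
      have h3 : v + 1 ≤ zspecF s i := this
      omega
    | succ d ih =>
      intro v hd hv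
      have hlt : v + 1 ≤ zspecF s i := by omega
      obtain ⟨hx, hy, ht⟩ := (le_zlcp_iff (v + 1) s (s.drop i)).mp hlt
      have hyl : i + v < s.length := by simp at hy; omega
      have hch : s.getD v ' ' = s.getD (i + v) ' ' := by
        have h1 : s[v]? = (s.drop i)[v]? := take_eq_char (Nat.lt_succ_self v) ht
        rw [List.getElem?_drop] at h1
        rw [List.getD_eq_getElem?_getD, List.getD_eq_getElem?_getD, h1]
      rw [zext_unfold, if_pos ⟨hyl, hch⟩]
      exact ih (v + 1) (by omega) hlt
  intro v hv; exact H (zspecF s i - v) v rfl hv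

-- loop invariant for z_function's main loop
def ZInv (s : List Char) (i : Nat) (st : List Nat × Nat × Nat) : Prop :=
  st.1.length = s.length ∧
  (∀ j, st.1.getD j 0 = if 1 ≤ j ∧ j < i then zspecF s j else 0) ∧
  ((st.2.1 = 0 ∧ st.2.2 = 0) ∨
   (1 ≤ st.2.1 ∧ st.2.1 < i ∧ st.2.2 < s.length ∧ st.2.2 + 1 - st.2.1 ≤ zspecF s st.2.1))

theorem zstep_inv (s : List Char) (i : Nat) (st : List Nat × Nat × Nat)
    (hi : 1 ≤ i) (hin : i < s.length) (h : ZInv s i st) : ZInv s (i + 1) (zstep s st i) := by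
  obtain ⟨z, l, r⟩ := st
  obtain ⟨hlen, hz, hbox⟩ := h
  simp only at hlen hz hbox
  have hv : (if i ≤ r then min (r - i + 1) (z.getD (i - l) 0) else z.getD i 0) ≤ zspecF s i := by
    by_cases hir : i ≤ r
    · rw [if_pos hir]
      have hboxr : 1 ≤ l ∧ l < i ∧ r < s.length ∧ r + 1 - l ≤ zspecF s l := by
        rcases hbox with ⟨h0, h0'⟩ | hb
        · exfalso; omega
        · exact hb
      obtain ⟨hl1, hli, hrn, hbx⟩ := hboxr
      have hzil : z.getD (i - l) 0 = zspecF s (i - l) := by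
        rw [hz (i - l), if_pos ⟨by omega, by omega⟩]
      rw [hzil]
      refine (le_zlcp_iff (min (r - i + 1) (zspecF s (i - l))) s (s.drop i)).mpr ⟨?_, ?_, ?_⟩
      · have := min_le_left (r - i + 1) (zspecF s (i - l)); omega
      · have := min_le_left (r - i + 1) (zspecF s (i - l)); simp; omega
      · apply take_eq_of_chars
        intro k hk
        rw [List.getElem?_drop]
        have hk1 : k < r - i + 1 := lt_of_lt_of_le hk (min_le_left _ _)
        have hk2 : k < zspecF s (i - l) := lt_of_lt_of_le hk (min_le_right _ _)
        obtain ⟨_, _, ht1⟩ := (le_zlcp_iff (k + 1) s (s.drop (i - l))).mp hk2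
        have e1 : s[k]? = s[(i - l) + k]? := by
          have := take_eq_char (Nat.lt_succ_self k) ht1
          rwa [List.getElem?_drop] at this
        obtain ⟨_, _, ht2⟩ := (le_zlcp_iff (r + 1 - l) s (s.drop l)).mp hbx
        have e2 : s[(i - l) + k]? = s[i + k]? := by
          have hklt : (i - l) + k < r + 1 - l := by omega
          have := take_eq_char hklt ht2
          rw [List.getElem?_drop] at this
          rw [this]; congr 1; omega
        rw [e1, e2]
    · rw [if_neg hir, hz i, if_neg (by omega)]
      exact Nat.zero_le _
  set w := zext s i (if i ≤ r then min (r - i + 1) (z.getD (i - l) 0) else z.getD i 0) with hwdef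
  have hw : w = zspecF s i := zext_eq s i hi _ hv
  have hstep : zstep s (z, l, r) i =
      if r < i + w - 1 then (z.set i w, i, i + w - 1) else (z.set i w, l, r) := rfl
  have hgetD : ∀ j, (z.set i w).getD j 0 = if 1 ≤ j ∧ j < i + 1 then zspecF s j else 0 := by
    intro j
    by_cases hji : j = i
    · rw [hji]
      have hset : (z.set i w).getD i 0 = w := by
        rw [List.getD_eq_getElem?_getD, List.getElem?_set_self (by omega : i < z.length)]; rfl
      rw [hset, if_pos ⟨hi, Nat.lt_succ_self i⟩, hw]
    · have hset : (z.set i w).getD j 0 = z.getD j 0 := by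
        rw [List.getD_eq_getElem?_getD, List.getElem?_set_ne (fun hij => hji hij.symm),
          ← List.getD_eq_getElem?_getD]
      rw [hset, hz j]
      by_cases h1 : 1 ≤ j ∧ j < i
      · rw [if_pos h1, if_pos ⟨h1.1, by omega⟩]
      · rw [if_neg h1, if_neg (by omega)]
  rw [hstep]
  split_ifs with hc
  · unfold ZInv
    dsimp only
    refine ⟨by simp [hlen], hgetD, Or.inr ⟨hi, Nat.lt_succ_self i, ?_, ?_⟩⟩
    · have := zspecF_le s i; omega
    · have := zspecF_le s i; omega
  · unfold ZInv
    dsimp only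
    refine ⟨by simp [hlen], hgetD, ?_⟩
    rcases hbox with ⟨hb1, hb2⟩ | ⟨a, b, c, d⟩
    · exact Or.inl ⟨hb1, hb2⟩
    · exact Or.inr ⟨a, by omega, c, d⟩

theorem z_function_port_spec (s : List Char) :
    (z_function_port s).length = s.length ∧
    ∀ j, (z_function_port s).getD j 0 = if 1 ≤ j ∧ j < s.length then zspecF s j else 0 := by
  have H : ∀ k, k ≤ s.length - 1 →
      ZInv s (1 + k) ((List.range' 1 k).foldl (zstep s) (List.replicate s.length 0, 0, 0)) := by
    intro k
    induction k with
    | zero =>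
      intro _
      unfold ZInv
      refine ⟨by simp, ?_, Or.inl ⟨rfl, rfl⟩⟩
      intro j
      rw [if_neg (by omega)]
      simp [List.getD_eq_getElem?_getD, List.getElem?_replicate]
      split <;> rfl
    | succ k ih =>
      intro hk
      have hrange : List.range' 1 (k + 1) = List.range' 1 k ++ [1 + k] := by
        simpa using List.range'_concat (step := 1) (s := 1) (n := k)
      rw [hrange, List.foldl_append, List.foldl_cons, List.foldl_nil]
      exact zstep_inv s (1 + k) _ (by omega) (by omega) (ih (by omega))
  obtain ⟨hlen, hz, _⟩ := H (s.length - 1) le_rfl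
  refine ⟨hlen, ?_⟩
  intro j
  have hj := hz j
  have hiff : (1 ≤ j ∧ j < 1 + (s.length - 1)) ↔ (1 ≤ j ∧ j < s.length) := by omega
  rw [if_congr hiff rfl rfl] at hj
  exact hj

theorem comb_drop (t p : List Char) (j : Nat) :
    (p ++ '#' :: t).drop (p.length + 1 + j) = t.drop j := by
  rw [List.drop_append, List.drop_eq_nil_of_le (by omega), List.nil_append]
  have h : p.length + 1 + j - p.length = j + 1 := by omega
  rw [h, List.drop_succ_cons]

theorem comb_take (t p : List Char) : (p ++ '#' :: t).take p.length = p := by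
  rw [List.take_append, List.take_length, Nat.sub_self]
  simp

theorem comb_get_m (t p : List Char) : (p ++ '#' :: t)[p.length]? = some '#' := by
  rw [List.getElem?_append_right (le_refl _), Nat.sub_self]
  rfl

theorem zspec_eq_m_iff (t p : List Char) (j : Nat) (hm : 1 ≤ p.length) (hj : j < t.length) :
    (zspecF (p ++ '#' :: t) (p.length + 1 + j) = p.length ↔
      ((t.drop j).take p.length = p ∧
        ¬(j + p.length < t.length ∧ t.getD (j + p.length) ' ' = '#'))) := by
  have hclen : (p ++ '#' :: t).length = p.length + 1 + t.length := by
    simp [List.length_append]; omega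
  have hdlen : (t.drop j).length = t.length - j := by simp
  have hE : p.length ≤ zspecF (p ++ '#' :: t) (p.length + 1 + j) ↔ (t.drop j).take p.length = p := by
    rw [zspecF, le_zlcp_iff, comb_drop, comb_take]
    constructor
    · rintro ⟨_, _, h⟩; exact h.symm
    · intro h
      have hl : ((t.drop j).take p.length).length = p.length := by rw [h]
      simp at hl
      exact ⟨by omega, by omega, h.symm⟩
  have hH : p.length + 1 ≤ zspecF (p ++ '#' :: t) (p.length + 1 + j) ↔
      ((t.drop j).take p.length = p ∧ j + p.length < t.length ∧ t.getD (j + p.length) ' ' = '#') := by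
    rw [zspecF, le_zlcp_iff, comb_drop]
    constructor
    · rintro ⟨h1, h2, h3⟩
      have h4 : (p ++ '#' :: t).take p.length = (t.drop j).take p.length := by
        have := congrArg (List.take p.length) h3
        simpa [List.take_take] using this
      rw [comb_take] at h4
      have hjm : j + p.length < t.length := by omega
      have h5 := take_eq_char (Nat.lt_succ_self p.length) h3
      rw [comb_get_m, List.getElem?_drop] at h5
      have h6 : t[j + p.length]? = some '#' := h5.symm
      have hch : t.getD (j + p.length) ' ' = '#' := by
        rw [List.getD_eq_getElem?_getD, h6]; rfl
      exact ⟨h4.symm, hjm, hch⟩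
    · rintro ⟨hE', hjm, hch⟩
      refine ⟨by omega, by omega, take_succ_eq ?_ ?_⟩
      · rw [comb_take]; exact hE'.symm
      · rw [comb_get_m, List.getElem?_drop]
        rw [List.getD_eq_getElem?_getD, List.getElem?_eq_getElem hjm] at hch
        rw [List.getElem?_eq_getElem hjm]
        simp at hch
        simp [hch]
  constructor
  · intro h
    have h1 := hE.mp (by omega)
    refine ⟨h1, ?_⟩
    rintro ⟨hjm, hch⟩
    have := hH.mpr ⟨h1, hjm, hch⟩
    omega
  · rintro ⟨hE', hneg⟩
    have h1 : p.length ≤ zspecF (p ++ '#' :: t) (p.length + 1 + j) := hE.mpr hE'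
    have h2 : ¬ (p.length + 1 ≤ zspecF (p ++ '#' :: t) (p.length + 1 + j)) := fun hh =>
      hneg ((hH.mp hh).2)
    omega

theorem foldl_if_filterMap {α β : Type} (l : List α) (p : α → Prop) [DecidablePred p]
    (f : α → β) (acc : List β) :
    l.foldl (fun acc x => if p x then acc ++ [f x] else acc) acc
      = acc ++ l.filterMap (fun x => if p x then some (f x) else none) := by
  induction l generalizing acc with
  | nil => simp
  | cons x xs ih => by_cases h : p x <;> simp [h, ih]

theorem scanRev_iff (rp : List Char) (rest : List Char) : ∀ acc,
    (scanRev rp acc rest = true ↔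
      ∃ u v, rest = u ++ '#' :: v ∧ rp <+: (u.reverse ++ acc)) := by
  induction rest with
  | nil =>
    intro acc
    simp [scanRev]
  | cons c rest ih =>
    intro acc
    rw [scanRev]
    simp only [Bool.or_eq_true, Bool.and_eq_true, decide_eq_true_eq, ih (c :: acc)]
    constructor
    · rintro (⟨hc, hp⟩ | ⟨u, v, huv, hpre⟩)
      · exact ⟨[], rest, by simp [hc], by simpa using List.isPrefixOf_iff_prefix.mp hp⟩
      · exact ⟨c :: u, v, by simp [huv], by simpa [List.append_assoc] using hpre⟩
    · rintro ⟨u, v, huv, hpre⟩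
      cases u with
      | nil =>
        left
        simp at huv hpre
        exact ⟨huv.1, List.isPrefixOf_iff_prefix.mpr hpre⟩
      | cons c' u =>
        right
        simp at huv
        refine ⟨u, v, huv.2, ?_⟩
        have : c' = c := huv.1.symm
        subst this
        simpa [List.append_assoc] using hpre

theorem hash_occ_iff (t p : List Char) :
    (scanRev p.reverse [] t = true) ↔ ∃ j, (t.drop j).take p.length = p ∧
      j + p.length < t.length ∧ t.getD (j + p.length) ' ' = '#' := by
  rw [scanRev_iff p.reverse t []]
  constructor
  · rintro ⟨u, v, huv, hpre⟩
    rw [List.append_nil] at hpre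
    have hsuf : p <:+ u := List.reverse_prefix.mp hpre
    obtain ⟨w, hw⟩ := hsuf
    have hsu' : w ++ (p ++ '#' :: v) = t := by
      rw [huv, ← hw]; simp
    refine ⟨w.length, ?_, ?_, ?_⟩
    · rw [← hsu', List.drop_left, comb_take]
    · have := congrArg List.length hsu'
      simp [List.length_append] at this
      omega
    · rw [List.getD_eq_getElem?_getD, ← List.getElem?_drop, ← hsu', List.drop_left,
        comb_get_m]
      rfl
  · rintro ⟨j, hE, hjm, hch⟩
    have hsome : (t.drop j)[p.length]? = some '#' := by
      rw [List.getElem?_drop]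
      rw [List.getD_eq_getElem?_getD, List.getElem?_eq_getElem hjm] at hch
      rw [List.getElem?_eq_getElem hjm]
      simp at hch
      simp [hch]
    have h1 : (t.drop j).take (p.length + 1) = p ++ ['#'] := by
      rw [List.take_succ, hE, hsome]
      rfl
    have h2 : t.drop j = p ++ '#' :: (t.drop j).drop (p.length + 1) := by
      conv_lhs => rw [← List.take_append_drop (p.length + 1) (t.drop j)]
      rw [h1]
      simp
    refine ⟨t.take j ++ p, (t.drop j).drop (p.length + 1), ?_, ?_⟩
    · conv_lhs => rw [← List.take_append_drop j t, h2]
      rw [List.append_assoc]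
    · rw [List.append_nil]
      exact List.reverse_prefix.mpr (List.suffix_append _ _)

theorem pattern_len_pos (pattern : String) (hp : pattern ≠ "") : 1 ≤ pattern.toList.length := by
  have h0 : pattern.toList ≠ [] := fun h => hp (String.toList_eq_nil_iff.mp h)
  cases h : pattern.toList with
  | nil => exact absurd h h0
  | cons a l => simp

theorem z_search_char (text pattern : String) (hp : pattern ≠ "") :
    z_search text pattern = (List.range text.toList.length).filterMap
      (fun j => if zspecF (pattern.toList ++ '#' :: text.toList)
          (pattern.toList.length + 1 + j) = pattern.toList.length
        then some ((j : Int)) else none) := by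
  have hm : 1 ≤ pattern.toList.length := pattern_len_pos pattern hp
  obtain ⟨hzlen, hzget⟩ := z_function_port_spec (pattern.toList ++ '#' :: text.toList)
  have hclen : (pattern.toList ++ '#' :: text.toList).length
      = pattern.toList.length + 1 + text.toList.length := by
    simp [List.length_append]; omega
  unfold z_search
  rw [if_neg hp]
  show (List.range' (pattern.toList.length + 1)
      ((z_function_port (pattern.toList ++ '#' :: text.toList)).length
        - (pattern.toList.length + 1))).foldl
    (fun acc i => if (z_function_port (pattern.toList ++ '#' :: text.toList)).getD i 0
        = pattern.toList.length
      then acc ++ [(i : Int) - pattern.toList.length - 1] else acc) [] = _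
  rw [foldl_if_filterMap _ (fun i => (z_function_port (pattern.toList ++ '#' :: text.toList)).getD i 0
        = pattern.toList.length) (fun i => (i : Int) - pattern.toList.length - 1) []]
  rw [List.nil_append, hzlen, hclen]
  have hsub : pattern.toList.length + 1 + text.toList.length - (pattern.toList.length + 1)
      = text.toList.length := by omega
  rw [hsub, List.range'_eq_map_range, List.filterMap_map]
  apply List.filterMap_congr
  intro j hj
  rw [List.mem_range] at hj
  have hidx : (z_function_port (pattern.toList ++ '#' :: text.toList)).getD
      (pattern.toList.length + 1 + j) 0
      = zspecF (pattern.toList ++ '#' :: text.toList) (pattern.toList.length + 1 + j) := by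
    rw [hzget, if_pos ⟨by omega, by omega⟩]
  show (if (z_function_port (pattern.toList ++ '#' :: text.toList)).getD
      (pattern.toList.length + 1 + j) 0 = pattern.toList.length
    then some (((pattern.toList.length + 1 + j : Nat) : Int) - pattern.toList.length - 1)
    else none) = _
  rw [hidx]
  split_ifs with h
  · congr 1
    push_cast
    ring
  · rfl

theorem alt_char (text pattern : String) (hp : pattern ≠ "") :
    z_search_alt text pattern
      = (List.range (text.toList.length + 1 - pattern.toList.length)).filterMap
          (fun j => if (text.toList.drop j).take pattern.toList.length = pattern.toList
            then some ((j : Int)) else none) := by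
  unfold z_search_alt
  rw [if_neg hp]

-- ===== VERDICT (by name: the statement is the Claim_ definition above) =====
theorem z_search_spec : Claim_unchanged_z_search := by
  intro text pattern _
  unfold Spec_z_search
  intro hD
  by_cases hp : pattern = ""
  · unfold z_search z_search_alt
    rw [if_pos hp, if_pos hp]
  · have hm : 1 ≤ pattern.toList.length := pattern_len_pos pattern hp
    rw [z_search_char text pattern hp, alt_char text pattern hp]
    have hcongr : (List.range text.toList.length).filterMap
        (fun j => if zspecF (pattern.toList ++ '#' :: text.toList)
            (pattern.toList.length + 1 + j) = pattern.toList.length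
          then some ((j : Int)) else none)
        = (List.range text.toList.length).filterMap
        (fun j => if (text.toList.drop j).take pattern.toList.length = pattern.toList
          then some ((j : Int)) else none) := by
      apply List.filterMap_congr
      intro j hj
      rw [List.mem_range] at hj
      rw [if_congr (zspec_eq_m_iff text.toList pattern.toList j hm hj) rfl rfl]
      by_cases hE : (text.toList.drop j).take pattern.toList.length = pattern.toList
      · have hnh : ¬(j + pattern.toList.length < text.toList.length ∧
            text.toList.getD (j + pattern.toList.length) ' ' = '#') := by
          intro hh
          exact hD ⟨hp,
            (hash_occ_iff text.toList pattern.toList).mpr ⟨j, hE, hh.1, hh.2⟩⟩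
        rw [if_pos ⟨hE, hnh⟩, if_pos hE]
      · rw [if_neg (fun hh => hE hh.1), if_neg hE]
    rw [hcongr]
    have hsplit : List.range text.toList.length
        = List.range (text.toList.length + 1 - pattern.toList.length)
          ++ List.range' (text.toList.length + 1 - pattern.toList.length)
            (text.toList.length - (text.toList.length + 1 - pattern.toList.length)) := by
      rw [List.range_eq_range', List.range_eq_range']
      have := List.range'_append (s := 0) (step := 1)
        (m := text.toList.length + 1 - pattern.toList.length)
        (n := text.toList.length - (text.toList.length + 1 - pattern.toList.length))
      simp only [Nat.zero_add, Nat.one_mul] at this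
      rw [this]
      congr 1
      omega
    rw [hsplit, List.filterMap_append]
    have hnil : (List.range' (text.toList.length + 1 - pattern.toList.length)
        (text.toList.length - (text.toList.length + 1 - pattern.toList.length))).filterMap
        (fun j => if (text.toList.drop j).take pattern.toList.length = pattern.toList
          then some ((j : Int)) else none) = [] := by
      rw [List.filterMap_eq_nil_iff]
      intro j hjmem
      rw [List.mem_range'_1] at hjmem
      rw [if_neg]
      intro hE
      have hl := congrArg List.length hE
      rw [List.length_take, List.length_drop] at hl
      have hl2 : pattern.toList.length ≤ text.toList.length - j := by
        rcases Nat.le_total pattern.toList.length (text.toList.length - j) with h | h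
        · exact h
        · rw [Nat.min_eq_right h] at hl; omega
      omega
    rw [hnil, List.append_nil]

theorem z_search_changed : Claim_changed_z_search := by unfold Claim_changed_z_search; decide
theorem z_search_tight : Claim_exact_z_search := by
  intro text pattern _ hD
  obtain ⟨hp, hscan⟩ := hD
  obtain ⟨j, hE, hjm, hch⟩ := (hash_occ_iff text.toList pattern.toList).mp hscan
  have hjmem : j < text.toList.length := by omega
  have hm : 1 ≤ pattern.toList.length := pattern_len_pos pattern hp
  rw [z_search_char text pattern hp, alt_char text pattern hp]
  intro heq
  have hmemB : (j : Int) ∈ (List.range (text.toList.length + 1 - pattern.toList.length)).filterMap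
      (fun j => if (text.toList.drop j).take pattern.toList.length = pattern.toList
        then some ((j : Int)) else none) := by
    rw [List.mem_filterMap]
    exact ⟨j, List.mem_range.mpr (by omega), by rw [if_pos hE]⟩
  have hmemA : (j : Int) ∉ (List.range text.toList.length).filterMap
      (fun j => if zspecF (pattern.toList ++ '#' :: text.toList)
          (pattern.toList.length + 1 + j) = pattern.toList.length
        then some ((j : Int)) else none) := by
    rw [List.mem_filterMap]
    rintro ⟨a, ha, hfa⟩
    rw [List.mem_range] at ha
    by_cases h : zspecF (pattern.toList ++ '#' :: text.toList)
        (pattern.toList.length + 1 + a) = pattern.toList.length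
    · rw [if_pos h] at hfa
      have haj : a = j := by
        have := Option.some.inj hfa
        exact_mod_cast this
      subst haj
      rw [zspec_eq_m_iff text.toList pattern.toList a hm (by omega)] at h
      exact h.2 ⟨hjm, hch⟩
    · rw [if_neg h] at hfa
      simp at hfa
  rw [heq] at hmemA
  exact hmemA hmemB
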